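-- pv_equiv track=rewrite | github.com/paiml/depyler | examples/hard_array_peak.py | peak_to_valley_diff
-- ===== SOURCE A (Python) =====
-- def peak_to_valley_diff(arr: list[int], size: int) -> int:
--     """Find maximum difference between a peak and the following valley."""
--     max_diff: int = 0
--     i: int = 1
--     limit: int = size - 1
--     while i < limit:
--         prev_idx: int = i - 1
--         next_idx: int = i + 1
--         if arr[i] > arr[prev_idx] and arr[i] > arr[next_idx]:
--             j: int = i + 1
--             while j < limit:
--                 pj: int = j - 1
--                 nj: int = j + 1
--                 if arr[j] < arr[pj] and arr[j] < arr[nj]: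
--                     diff: int = arr[i] - arr[j]
--                     if diff > max_diff:
--                         max_diff = diff
--                     j = size
--                 j = j + 1
--         i = i + 1
--     return max_diff
-- ===== SOURCE B (Python) =====
-- def peak_to_valley_diff(arr: list[int], size: int) -> int:
--     """Find maximum difference between a peak and the following valley.
--
--     One O(n) pass: every peak between two consecutive valleys shares the same
--     "following valley", so it suffices to carry the highest pending peak and
--     resolve it at the next valley.
--     """
--     limit = size - 1
--     max_diff = 0
--     best_peak = None
--     for i in range(1, limit):
--         if arr[i] > arr[i - 1] and arr[i] > arr[i + 1]:
--             if best_peak is None or arr[i] > best_peak: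
--                 best_peak = arr[i]
--         elif arr[i] < arr[i - 1] and arr[i] < arr[i + 1]:
--             if best_peak is not None:
--                 d = best_peak - arr[i]
--                 if d > max_diff:
--                     max_diff = d
--                 best_peak = None
--     return max_diff
-- ===== Notes on version B (the rewrite author's own statement) =====
-- stated objective: alternative
-- what changed: A rescans forward from every peak to find its following valley (nested loops, quadratic in the worst case); B makes one left-to-right pass that carries the highest pending peak since the last valley and resolves it at the next valley, which is exact because all peaks between two consecutive valleys share the same following valley and only the highest matters for the max.
-- outside the precondition, e.g. on peak_to_valley_diff([6, -1], 3): A returns 0, B raises IndexError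
import Mathlib
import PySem

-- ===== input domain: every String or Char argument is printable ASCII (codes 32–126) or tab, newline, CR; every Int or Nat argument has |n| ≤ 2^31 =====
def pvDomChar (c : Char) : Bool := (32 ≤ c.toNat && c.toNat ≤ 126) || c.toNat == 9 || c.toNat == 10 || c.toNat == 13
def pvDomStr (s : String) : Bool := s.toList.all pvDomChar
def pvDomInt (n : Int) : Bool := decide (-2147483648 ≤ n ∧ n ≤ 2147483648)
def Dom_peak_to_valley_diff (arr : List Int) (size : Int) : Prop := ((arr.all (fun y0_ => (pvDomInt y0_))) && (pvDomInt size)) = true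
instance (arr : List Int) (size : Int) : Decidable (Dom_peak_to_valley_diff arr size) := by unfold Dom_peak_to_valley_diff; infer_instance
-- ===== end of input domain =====

-- B replaces A's peak-then-scan-for-valley nested loops with a single
-- left-to-right pass carrying the highest pending peak, resolved at each valley
-- (objective: alternative single-pass algorithm).

-- ===== PORT A =====
-- inner `while j < limit` loop: scan for the first valley after peak i;
-- on finding one, update max_diff and set j = size (then j+1, ending the loop).
def peak_to_valley_diff_inner (arr : List Int) (size i j maxd : Int) : Int :=
  let limit := size - 1
  if j < limit then
    let pj := j - 1
    let nj := j + 1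
    if PySem.List.pyGetD arr j 0 < PySem.List.pyGetD arr pj 0 ∧
       PySem.List.pyGetD arr j 0 < PySem.List.pyGetD arr nj 0 then
      let diff := PySem.List.pyGetD arr i 0 - PySem.List.pyGetD arr j 0
      let maxd' := if diff > maxd then diff else maxd
      peak_to_valley_diff_inner arr size i (size + 1) maxd'
    else
      peak_to_valley_diff_inner arr size i (j + 1) maxd
  else maxd
termination_by (size - 1 - j).toNat
decreasing_by all_goals (simp_wf; omega)

-- outer `while i < limit` loop of A
def peak_to_valley_diff_outer (arr : List Int) (size i maxd : Int) : Int :=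
  let limit := size - 1
  if i < limit then
    let prev_idx := i - 1
    let next_idx := i + 1
    if PySem.List.pyGetD arr i 0 > PySem.List.pyGetD arr prev_idx 0 ∧
       PySem.List.pyGetD arr i 0 > PySem.List.pyGetD arr next_idx 0 then
      peak_to_valley_diff_outer arr size (i + 1)
        (peak_to_valley_diff_inner arr size i (i + 1) maxd)
    else
      peak_to_valley_diff_outer arr size (i + 1) maxd
  else maxd
termination_by (size - 1 - i).toNat
decreasing_by all_goals (simp_wf; omega)

def peak_to_valley_diff (arr : List Int) (size : Int) : Int :=
  peak_to_valley_diff_outer arr size 1 0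

-- ===== PORT B =====
-- one step of B's single pass: state = (max_diff, best pending peak)
def peak_to_valley_diff_alt_step (arr : List Int) (st : Int × Option Int) (i : Int) : Int × Option Int :=
  let maxd := st.1
  let bp := st.2
  if PySem.List.pyGetD arr i 0 > PySem.List.pyGetD arr (i - 1) 0 ∧
     PySem.List.pyGetD arr i 0 > PySem.List.pyGetD arr (i + 1) 0 then
    match bp with
    | none => (maxd, some (PySem.List.pyGetD arr i 0))
    | some b => (maxd, some (if PySem.List.pyGetD arr i 0 > b then PySem.List.pyGetD arr i 0 else b))
  else if PySem.List.pyGetD arr i 0 < PySem.List.pyGetD arr (i - 1) 0 ∧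
          PySem.List.pyGetD arr i 0 < PySem.List.pyGetD arr (i + 1) 0 then
    match bp with
    | some b =>
      let d := b - PySem.List.pyGetD arr i 0
      ((if d > maxd then d else maxd), none)
    | none => (maxd, bp)
  else (maxd, bp)

def peak_to_valley_diff_alt (arr : List Int) (size : Int) : Int :=
  let limit := size - 1
  ((PySem.List.pyRange 1 limit 1).foldl (peak_to_valley_diff_alt_step arr) (0, none)).1

-- ===== PRECONDITION & SPEC =====
-- Pre_ excludes the out-of-range inputs with size > len(arr) (and size ≥ 3):
-- there the loops index past the end of arr, and A raises IndexError on almost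
-- all of them; on the few where A's short-circuited peak test happens to skip
-- every out-of-range read, B (whose valley test reads the same indices) raises,
-- so these accidental survivals of A are excluded rather than matched.
def Pre_peak_to_valley_diff (arr : List Int) (size : Int) : Prop :=
  size ≤ (arr.length : Int) ∨ size < 3
instance (arr : List Int) (size : Int) : Decidable (Pre_peak_to_valley_diff arr size) := by
  unfold Pre_peak_to_valley_diff; infer_instance

def pvWitness_peak_to_valley_diff : List Int × Int := ([1, 5, 2, 0, 3], 5)

def Spec_peak_to_valley_diff (arr : List Int) (size : Int) (out : Int) : Prop := out = peak_to_valley_diff_alt arr size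
instance (arr : List Int) (size : Int) (out : Int) : Decidable (Spec_peak_to_valley_diff arr size out) := by unfold Spec_peak_to_valley_diff; infer_instance

-- ===== CLAIM (what is proved, stated in full; the proofs are below) =====
def Claim_equal_peak_to_valley_diff : Prop := ∀ (arr : List Int) (size : Int), Dom_peak_to_valley_diff arr size → Pre_peak_to_valley_diff arr size → Spec_peak_to_valley_diff arr size (peak_to_valley_diff arr size)

-- ===== LEMMAS AND PROOFS =====

-- index of the first valley at position ≥ j (strictly before limit), if any
def pvFv (arr : List Int) (size j : Int) : Option Int :=
  if j < size - 1 then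
    if PySem.List.pyGetD arr j 0 < PySem.List.pyGetD arr (j - 1) 0 ∧
       PySem.List.pyGetD arr j 0 < PySem.List.pyGetD arr (j + 1) 0 then
      some j
    else pvFv arr size (j + 1)
  else none
termination_by (size - 1 - j).toNat
decreasing_by all_goals (simp_wf; omega)

-- A's inner loop returns max(maxd, arr[i] - arr[v]) for the first valley v ≥ j
theorem pv_inner_eq (arr : List Int) (size i : Int) (j maxd : Int) :
    peak_to_valley_diff_inner arr size i j maxd =
      match pvFv arr size j with
      | some v =>
          if PySem.List.pyGetD arr i 0 - PySem.List.pyGetD arr v 0 > maxd then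
            PySem.List.pyGetD arr i 0 - PySem.List.pyGetD arr v 0
          else maxd
      | none => maxd := by
  rw [peak_to_valley_diff_inner, pvFv]
  by_cases h : j < size - 1
  · rw [if_pos h, if_pos h]
    by_cases hv : PySem.List.pyGetD arr j 0 < PySem.List.pyGetD arr (j - 1) 0 ∧
        PySem.List.pyGetD arr j 0 < PySem.List.pyGetD arr (j + 1) 0
    · rw [if_pos hv, if_pos hv]
      rw [peak_to_valley_diff_inner]
      rw [if_neg (by omega : ¬ (size + 1 < size - 1))]
    · rw [if_neg hv, if_neg hv]
      exact pv_inner_eq arr size i (j + 1) maxd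
  · rw [if_neg h, if_neg h]
termination_by (size - 1 - j).toNat
decreasing_by all_goals (simp_wf; omega)

-- the joint invariant: B's fold from i with no pending peak equals A's outer
-- loop from i; with pending peak b it equals A's outer loop started from the
-- state in which b has already been resolved against the first valley ≥ i.
theorem pv_invariant (arr : List Int) (size i : Int) :
    (∀ maxd, ((PySem.List.pyRange i (size - 1) 1).foldl (peak_to_valley_diff_alt_step arr) (maxd, none)).1
        = peak_to_valley_diff_outer arr size i maxd) ∧
    (∀ maxd b, ((PySem.List.pyRange i (size - 1) 1).foldl (peak_to_valley_diff_alt_step arr) (maxd, some b)).1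
        = peak_to_valley_diff_outer arr size i
            (match pvFv arr size i with
             | some v => if b - PySem.List.pyGetD arr v 0 > maxd then b - PySem.List.pyGetD arr v 0 else maxd
             | none => maxd)) := by
  by_cases h : i < size - 1
  · have hrec := pv_invariant arr size (i + 1)
    have hrange : PySem.List.pyRange i (size - 1) 1 = i :: PySem.List.pyRange (i + 1) (size - 1) 1 :=
      PySem.List.pyRange_one_cons h
    constructor
    · intro maxd
      rw [hrange, List.foldl_cons, peak_to_valley_diff_outer, if_pos h]
      by_cases hp : PySem.List.pyGetD arr i 0 > PySem.List.pyGetD arr (i - 1) 0 ∧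
          PySem.List.pyGetD arr i 0 > PySem.List.pyGetD arr (i + 1) 0
      · rw [if_pos hp]
        have hstep : peak_to_valley_diff_alt_step arr (maxd, none) i = (maxd, some (PySem.List.pyGetD arr i 0)) := by
          unfold peak_to_valley_diff_alt_step
          rw [if_pos hp]
        rw [hstep, hrec.2, pv_inner_eq]
      · rw [if_neg hp]
        by_cases hv : PySem.List.pyGetD arr i 0 < PySem.List.pyGetD arr (i - 1) 0 ∧
            PySem.List.pyGetD arr i 0 < PySem.List.pyGetD arr (i + 1) 0
        · have hstep : peak_to_valley_diff_alt_step arr (maxd, none) i = (maxd, none) := by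
            unfold peak_to_valley_diff_alt_step
            rw [if_neg hp, if_pos hv]
          rw [hstep, hrec.1]
        · have hstep : peak_to_valley_diff_alt_step arr (maxd, none) i = (maxd, none) := by
            unfold peak_to_valley_diff_alt_step
            rw [if_neg hp, if_neg hv]
          rw [hstep, hrec.1]
    · intro maxd b
      rw [hrange, List.foldl_cons, peak_to_valley_diff_outer, if_pos h]
      by_cases hp : PySem.List.pyGetD arr i 0 > PySem.List.pyGetD arr (i - 1) 0 ∧
          PySem.List.pyGetD arr i 0 > PySem.List.pyGetD arr (i + 1) 0
      · -- i is a peak: pending peak becomes max b arr[i]; fv i = fv (i+1)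
        rw [if_pos hp]
        have hstep : peak_to_valley_diff_alt_step arr (maxd, some b) i =
            (maxd, some (if PySem.List.pyGetD arr i 0 > b then PySem.List.pyGetD arr i 0 else b)) := by
          unfold peak_to_valley_diff_alt_step
          rw [if_pos hp]
        have hfv : pvFv arr size i = pvFv arr size (i + 1) := by
          rw [pvFv, if_pos h, if_neg (by omega)]
        rw [hstep, hrec.2, pv_inner_eq, hfv]
        cases hc : pvFv arr size (i + 1) with
        | none => rfl
        | some v =>
          simp only []
          split_ifs <;> omega
      · rw [if_neg hp]
        by_cases hv : PySem.List.pyGetD arr i 0 < PySem.List.pyGetD arr (i - 1) 0 ∧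
            PySem.List.pyGetD arr i 0 < PySem.List.pyGetD arr (i + 1) 0 
        · -- i is a valley: pending peak b is resolved here; fv i = some i
          have hstep : peak_to_valley_diff_alt_step arr (maxd, some b) i =
              ((if b - PySem.List.pyGetD arr i 0 > maxd then b - PySem.List.pyGetD arr i 0 else maxd), none) := by
            unfold peak_to_valley_diff_alt_step
            rw [if_neg hp, if_pos hv]
          have hfv : pvFv arr size i = some i := by
            rw [pvFv, if_pos h, if_pos hv]
          rw [hstep, hrec.1, hfv]
        · -- neither: state unchanged; fv i = fv (i+1)
          have hstep : peak_to_valley_diff_alt_step arr (maxd, some b) i = (maxd, some b) := by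
            unfold peak_to_valley_diff_alt_step
            rw [if_neg hp, if_neg hv]
          have hfv : pvFv arr size i = pvFv arr size (i + 1) := by
            rw [pvFv, if_pos h, if_neg hv]
          rw [hstep, hrec.2, hfv]
  · have hnil : PySem.List.pyRange i (size - 1) 1 = [] :=
      PySem.List.pyRange_one_eq_nil (by omega)
    have hout : ∀ maxd, peak_to_valley_diff_outer arr size i maxd = maxd := by
      intro maxd; rw [peak_to_valley_diff_outer, if_neg h]
    have hfv : pvFv arr size i = none := by
      rw [pvFv, if_neg h]
    refine ⟨?_, ?_⟩
    · intro maxd; rw [hnil]; simp [hout]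
    · intro maxd b; rw [hnil, hfv]; simp [hout]
termination_by (size - 1 - i).toNat
decreasing_by all_goals (simp_wf; omega)

-- ===== VERDICT (by name: the statement is the Claim_ definition above) =====
theorem peak_to_valley_diff_spec : Claim_equal_peak_to_valley_diff := by
  intro arr size _ _
  unfold Spec_peak_to_valley_diff peak_to_valley_diff peak_to_valley_diff_alt
  exact ((pv_invariant arr size 1).1 0).symm
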